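-- pv_equiv track=rewrite | github.com/bmuralid/Pure-Fortran | xp2cpp.py | first_mismatch_line
-- ===== SOURCE A (Python) =====
-- def first_mismatch_line(left: str, right: str) -> int | None:
--     left_lines = left.splitlines()
--     right_lines = right.splitlines()
--     for index, (left_line, right_line) in enumerate(zip(left_lines, right_lines), start=1):
--         if left_line != right_line:
--             return index
--     if len(left_lines) != len(right_lines):
--         return min(len(left_lines), len(right_lines)) + 1
--     return None
-- ===== SOURCE B (Python) =====
-- def first_mismatch_line(left: str, right: str) -> int | None:
--     # Binary search on prefix equality: "the first k lines agree" is a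
--     # monotone predicate, so the smallest k with differing k-line prefixes
--     # is exactly the first mismatching line number.
--     ll = left.splitlines()
--     rl = right.splitlines()
--     hi = max(len(ll), len(rl))
--     if ll[:hi] == rl[:hi]:  # prefixes of maximal length agree <=> the texts' lines agree
--         return None
--     lo = 0  # invariant: ll[:lo] == rl[:lo] and ll[:hi] != rl[:hi]
--     while hi - lo > 1:
--         mid = (lo + hi) // 2
--         if ll[:mid] == rl[:mid]:
--             lo = mid
--         else:
--             hi = mid
--     return hi
-- ===== Notes on version B (the rewrite author's own statement) =====
-- stated objective: alternative
-- what changed: Replaces A's single linear zip-scan plus post-loop length comparison with a binary search over the monotone predicate 'the first k lines of both texts agree', returning the smallest prefix length on which the texts disagree.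
import Mathlib
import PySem

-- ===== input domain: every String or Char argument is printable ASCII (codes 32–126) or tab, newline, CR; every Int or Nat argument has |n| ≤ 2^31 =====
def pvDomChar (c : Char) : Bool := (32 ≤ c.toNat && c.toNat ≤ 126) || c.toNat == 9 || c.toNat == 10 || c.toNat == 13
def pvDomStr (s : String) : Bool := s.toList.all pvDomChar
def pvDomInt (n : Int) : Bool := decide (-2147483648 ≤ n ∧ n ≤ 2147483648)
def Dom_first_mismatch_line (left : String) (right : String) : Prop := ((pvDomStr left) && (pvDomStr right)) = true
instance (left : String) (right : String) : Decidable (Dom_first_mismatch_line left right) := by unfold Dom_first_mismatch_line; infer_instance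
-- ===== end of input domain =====

-- B replaces A's linear zip-scan + post-loop length check with a binary search over
-- the monotone predicate "the first k lines agree": alternative algorithm, same result.

-- ===== PORT A =====
-- the 'for index, (l, r) in enumerate(zip(...), start=1)' loop: first 1-based index with differing lines
def aLoop : List (String × String) → Nat → Option Int
  | [], _ => none
  | (a, b) :: t, i => if a ≠ b then some (i : Int) else aLoop t (i + 1)

def first_mismatch_line (left : String) (right : String) : Option Int :=
  let left_lines := PySem.Str.splitlines left
  let right_lines := PySem.Str.splitlines right
  match aLoop (left_lines.zip right_lines) 1 with
  | some i => some i
  | none =>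
    if left_lines.length ≠ right_lines.length then
      some ((min left_lines.length right_lines.length : Nat) + 1 : Int)
    else none

-- ===== PORT B =====
-- Source B's 'while hi - lo > 1' binary search; 'xs[:k]' with 0 ≤ k is exactly List.take k,
-- and '(lo + hi) // 2' on the nonnegative lo, hi is exactly Nat division
def bSearch (ll rl : List String) (lo hi : Nat) : Int :=
  if hi - lo > 1 then
    let mid := (lo + hi) / 2
    if ll.take mid = rl.take mid then bSearch ll rl mid hi
    else bSearch ll rl lo mid
  else (hi : Int)
termination_by hi - lo
decreasing_by all_goals omega

def first_mismatch_line_alt (left : String) (right : String) : Option Int :=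
  let ll := PySem.Str.splitlines left
  let rl := PySem.Str.splitlines right
  let hi := max ll.length rl.length
  if ll.take hi = rl.take hi then none
  else some (bSearch ll rl 0 hi)

-- ===== PRECONDITION & SPEC =====
def Spec_first_mismatch_line (left : String) (right : String) (out : Option Int) : Prop := out = first_mismatch_line_alt left right
instance (left : String) (right : String) (out : Option Int) : Decidable (Spec_first_mismatch_line left right out) := by unfold Spec_first_mismatch_line; infer_instance

-- ===== CLAIM (what is proved, stated in full; the proofs are below) =====
def Claim_equal_first_mismatch_line : Prop := ∀ (left : String) (right : String), Dom_first_mismatch_line left right → Spec_first_mismatch_line left right (first_mismatch_line left right)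

-- ===== LEMMAS AND PROOFS =====

-- length of the common line-prefix: the shared characterisation of both algorithms
def cpl : List String → List String → Nat
  | a :: t, b :: u => if a = b then cpl t u + 1 else 0
  | _, _ => 0

-- A's loop together with its post-loop length check, as one function of the line lists
def aPost (ll rl : List String) (i : Nat) : Option Int :=
  match aLoop (ll.zip rl) i with
  | some k => some k
  | none =>
    if ll.length ≠ rl.length then
      some ((min ll.length rl.length : Nat) + (i : Int))
    else none

lemma aLoop_self (ll : List String) (i : Nat) : aLoop (ll.zip ll) i = none := by
  induction ll generalizing i with
  | nil => rfl
  | cons a t ih => simpa [aLoop] using ih (i + 1)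

lemma aPost_cons (a : String) (t u : List String) (i : Nat) :
    aPost (a :: t) (a :: u) i = aPost t u (i + 1) := by
  unfold aPost
  rw [List.zip_cons_cons, aLoop, if_neg (by simp)]
  cases aLoop (t.zip u) (i + 1) with
  | some k => rfl
  | none =>
    simp only [List.length_cons]
    by_cases hlen : t.length = u.length
    · simp [hlen]
    · rw [if_pos (by omega : (t.length + 1 : Nat) ≠ u.length + 1), if_pos hlen]
      rw [Nat.succ_min_succ]
      congr 1
      push_cast
      ring

lemma aPost_of_ne (ll rl : List String) (i : Nat) (h : ll ≠ rl) :
    aPost ll rl i = some ((i + cpl ll rl : Nat) : Int) := by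
  induction ll generalizing rl i with
  | nil =>
    cases rl with
    | nil => exact absurd rfl h
    | cons b u => simp [aPost, aLoop, cpl]
  | cons a t ih =>
    cases rl with
    | nil => simp [aPost, aLoop, cpl]
    | cons b u =>
      by_cases hab : a = b
      · subst hab
        have htu : t ≠ u := fun he => h (by rw [he])
        have hc : cpl (a :: t) (a :: u) = cpl t u + 1 := by rw [cpl, if_pos rfl]
        rw [aPost_cons, ih u (i + 1) htu, hc]
        congr 1
        omega
      · unfold aPost
        rw [List.zip_cons_cons, aLoop, if_pos hab]
        have hc : cpl (a :: t) (b :: u) = 0 := by rw [cpl, if_neg hab]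
        rw [hc]
        simp

lemma cpl_lt_max (ll rl : List String) (h : ll ≠ rl) :
    cpl ll rl < max ll.length rl.length := by
  induction ll generalizing rl with
  | nil =>
    cases rl with
    | nil => exact absurd rfl h
    | cons b u => simp [cpl]
  | cons a t ih =>
    cases rl with
    | nil => simp [cpl]
    | cons b u =>
      by_cases hab : a = b
      · subst hab
        have htu : t ≠ u := fun he => h (by rw [he])
        have hc : cpl (a :: t) (a :: u) = cpl t u + 1 := by rw [cpl, if_pos rfl]
        have := ih u htu
        simp only [hc, List.length_cons]
        omega
      · have hc : cpl (a :: t) (b :: u) = 0 := by rw [cpl, if_neg hab]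
        simp [hc]

lemma take_eq_iff_le_cpl (ll rl : List String) (h : ll ≠ rl) (k : Nat) :
    ll.take k = rl.take k ↔ k ≤ cpl ll rl := by
  induction ll generalizing rl k with
  | nil =>
    cases rl with
    | nil => exact absurd rfl h
    | cons b u =>
      cases k with
      | zero => simp
      | succ k => simp [cpl]
  | cons a t ih =>
    cases rl with
    | nil =>
      cases k with
      | zero => simp
      | succ k => simp [cpl]
    | cons b u =>
      cases k with
      | zero => simp
      | succ k =>
        by_cases hab : a = b
        · subst hab
          have htu : t ≠ u := fun he => h (by rw [he])
          have hc : cpl (a :: t) (a :: u) = cpl t u + 1 := by rw [cpl, if_pos rfl]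
          simp [hc, ih u htu k]
        · have hc : cpl (a :: t) (b :: u) = 0 := by rw [cpl, if_neg hab]
          simp [hc, hab]

lemma bSearch_eq (ll rl : List String) (h : ll ≠ rl) (lo hi : Nat)
    (h1 : lo ≤ cpl ll rl) (h2 : cpl ll rl < hi) :
    bSearch ll rl lo hi = ((cpl ll rl : Nat) + 1 : Int) := by
  rw [bSearch]
  by_cases hwh : hi - lo > 1
  · simp only [hwh, if_true]
    by_cases hm : ll.take ((lo + hi) / 2) = rl.take ((lo + hi) / 2)
    · rw [if_pos hm]
      exact bSearch_eq ll rl h _ hi ((take_eq_iff_le_cpl ll rl h _).mp hm) h2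
    · rw [if_neg hm]
      have := (take_eq_iff_le_cpl ll rl h ((lo + hi) / 2)).not.mp hm
      exact bSearch_eq ll rl h lo _ h1 (by omega)
  · simp only [hwh, if_false]
    have : hi = cpl ll rl + 1 := by omega
    simp [this]
termination_by hi - lo
decreasing_by all_goals omega

-- both ports, expressed over the already-split line lists
lemma core (ll rl : List String) :
    aPost ll rl 1 =
      (if ll.take (max ll.length rl.length) = rl.take (max ll.length rl.length) then none
       else some (bSearch ll rl 0 (max ll.length rl.length))) := by
  by_cases h : ll = rl
  · subst h
    simp [aPost, aLoop_self]
  · have hmax : ¬ (ll.take (max ll.length rl.length) = rl.take (max ll.length rl.length)) := by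
      rw [List.take_of_length_le (le_max_left _ _), List.take_of_length_le (le_max_right _ _)]
      exact h
    rw [if_neg hmax, aPost_of_ne ll rl 1 h,
      bSearch_eq ll rl h 0 _ (Nat.zero_le _) (cpl_lt_max ll rl h)]
    congr 1
    push_cast
    ring

-- ===== VERDICT (by name: the statement is the Claim_ definition above) =====
theorem first_mismatch_line_spec : Claim_equal_first_mismatch_line := by
  intro left right _
  show _ = _
  exact core (PySem.Str.splitlines left) (PySem.Str.splitlines right)
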